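-- pv_equiv track=rewrite | github.com/seLain/codesnippets | python3/common_child_of_strings/main_problematic.py | remove_unique_chars
-- ===== SOURCE A (Python) =====
-- def remove_unique_chars(s, nonunique_chars):
--     counter = 0
--     list_s = list(s)
--     while counter < len(list_s):
--         if list_s[counter] not in nonunique_chars:
--             del list_s[counter]
--         else:
--             counter += 1
--     return ''.join(list_s)
-- ===== SOURCE B (Python) =====
-- def remove_unique_chars(s, nonunique_chars):
--     delete = {ord(c): None for c in set(s) if c not in nonunique_chars}
--     return s.translate(delete)
-- ===== Notes on version B (the rewrite author's own statement) =====
-- stated objective: idiomatic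
-- what changed: Replaces the index-walking while-loop that deletes characters in place from a list with building a deletion table over the distinct characters of s once and delegating the filtering pass to str.translate.
import Mathlib
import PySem

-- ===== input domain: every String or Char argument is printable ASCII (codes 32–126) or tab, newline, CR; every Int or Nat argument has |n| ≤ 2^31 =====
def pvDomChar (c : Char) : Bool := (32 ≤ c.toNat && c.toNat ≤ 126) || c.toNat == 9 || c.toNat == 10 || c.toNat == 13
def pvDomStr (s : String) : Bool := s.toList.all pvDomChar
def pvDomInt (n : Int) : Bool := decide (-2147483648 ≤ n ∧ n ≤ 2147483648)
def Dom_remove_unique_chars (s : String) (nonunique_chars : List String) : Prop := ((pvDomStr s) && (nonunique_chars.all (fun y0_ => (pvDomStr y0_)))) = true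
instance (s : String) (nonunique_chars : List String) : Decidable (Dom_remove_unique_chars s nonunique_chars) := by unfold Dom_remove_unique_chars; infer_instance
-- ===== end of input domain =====

-- ===== PORT A =====
-- B keeps only chars of s appearing in nonunique_chars via a deletion table + str.translate,
-- instead of A's in-place index walk; return values proved equal on all inputs.
def ruc_loop (nonunique_chars : List String) (l : List Char) (counter : Nat) : List Char :=
  if h : counter < l.length then
    if String.ofList [l.get ⟨counter, h⟩] ∈ nonunique_chars then
      ruc_loop nonunique_chars l (counter + 1)
    else
      ruc_loop nonunique_chars (l.eraseIdx counter) counter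
  else l
termination_by l.length - counter
decreasing_by
  · omega
  · have h2 : (l.eraseIdx counter).length = l.length - 1 := by
      rw [List.length_eraseIdx]; simp [h]
    omega

def remove_unique_chars (s : String) (nonunique_chars : List String) : String :=
  String.ofList (ruc_loop nonunique_chars s.toList 0)

-- ===== PORT B =====
-- deletion table: the distinct chars of s that are NOT in nonunique_chars (set(s) comprehension);
-- the table is only used for membership, so set-iteration order cannot matter.
def ruc_deleteSet (s : String) (nonunique_chars : List String) : PySem.Set Char :=
  (PySem.Set.ofList s.toList).filter (fun c => ¬ String.ofList [c] ∈ nonunique_chars)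

-- str.translate with an all-None table = drop exactly the chars in the table, one pass
def remove_unique_chars_alt (s : String) (nonunique_chars : List String) : String :=
  let delete := ruc_deleteSet s nonunique_chars
  String.ofList (s.toList.filter (fun c => ¬ delete.contains c))

-- ===== PRECONDITION & SPEC =====
def Spec_remove_unique_chars (s : String) (nonunique_chars : List String) (out : String) : Prop := out = remove_unique_chars_alt s nonunique_chars
instance (s : String) (nonunique_chars : List String) (out : String) : Decidable (Spec_remove_unique_chars s nonunique_chars out) := by unfold Spec_remove_unique_chars; infer_instance

-- ===== CLAIM (what is proved, stated in full; the proofs are below) =====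
def Claim_equal_remove_unique_chars : Prop := ∀ (s : String) (nonunique_chars : List String), Dom_remove_unique_chars s nonunique_chars → Spec_remove_unique_chars s nonunique_chars (remove_unique_chars s nonunique_chars)

-- ===== LEMMAS AND PROOFS =====
theorem ruc_loop_eq (nonunique_chars : List String) (l : List Char) (counter : Nat) :
    ruc_loop nonunique_chars l counter =
      l.take counter ++ (l.drop counter).filter (fun c => decide (String.ofList [c] ∈ nonunique_chars)) := by
  induction l, counter using ruc_loop.induct nonunique_chars with
  | case1 l counter h hmem ih =>
    rw [ruc_loop, dif_pos h, if_pos hmem, ih]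
    have hd : l.drop counter = l.get ⟨counter, h⟩ :: l.drop (counter + 1) :=
      List.drop_eq_getElem_cons h
    have htk : l.take (counter + 1) = l.take counter ++ [l[counter]] := by
      rw [List.take_add_one, List.getElem?_eq_getElem h]; rfl
    rw [hd, List.filter_cons]
    simp only [List.get_eq_getElem] at hmem ⊢
    simp only [hmem, decide_true, if_true]
    rw [htk, List.append_assoc]
    rfl
  | case2 l counter h hmem ih =>
    rw [ruc_loop, dif_pos h, if_neg hmem, ih]
    have ht : (l.eraseIdx counter).take counter = l.take counter := by
      rw [List.eraseIdx_eq_take_drop_succ]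
      rw [List.take_append_of_le_length (by simp [Nat.le_of_lt h])]
      simp [List.take_take]
    have hdr : (l.eraseIdx counter).drop counter = l.drop (counter + 1) := by
      rw [List.eraseIdx_eq_take_drop_succ]
      rw [List.drop_append_of_le_length (by simp [Nat.le_of_lt h])]
      simp
    have hd : l.drop counter = l.get ⟨counter, h⟩ :: l.drop (counter + 1) :=
      List.drop_eq_getElem_cons h
    rw [ht, hdr, hd, List.filter_cons]
    simp only [List.get_eq_getElem] at hmem ⊢
    simp [hmem]
  | case3 l counter h =>
    rw [ruc_loop, dif_neg h]
    have : l.length ≤ counter := Nat.le_of_not_lt h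
    simp [List.take_of_length_le this, List.drop_of_length_le this]

theorem deleteSet_contains (s : String) (nonunique_chars : List String) (c : Char)
    (hc : c ∈ s.toList) :
    ((ruc_deleteSet s nonunique_chars).contains c) = !decide (String.ofList [c] ∈ nonunique_chars) := by
  unfold ruc_deleteSet
  by_cases hm : String.ofList [c] ∈ nonunique_chars
  · simp only [hm, decide_true, Bool.not_true]
    simp only [PySem.Set.contains, List.contains_eq_mem, decide_eq_false_iff_not]
    intro h
    have := List.of_mem_filter h
    simp [hm] at this
  · simp only [hm, decide_false, Bool.not_false]
    simp only [PySem.Set.contains, List.contains_eq_mem, decide_eq_true_eq]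
    exact List.mem_filter.mpr ⟨(PySem.Set.mem_ofList _ _).mpr hc, by simp [hm]⟩

-- ===== VERDICT (by name: the statement is the Claim_ definition above) =====
theorem remove_unique_chars_spec : Claim_equal_remove_unique_chars := by
  intro s nonunique_chars _
  unfold Spec_remove_unique_chars remove_unique_chars remove_unique_chars_alt
  rw [ruc_loop_eq]
  simp only [List.take_zero, List.drop_zero, List.nil_append]
  congr 1
  apply List.filter_congr
  intro c hc
  rw [deleteSet_contains s nonunique_chars c hc]
  simp
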